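-- pv_equiv track=rewrite | github.com/christos-golsouzidis/python | sudoku.py | check_w
-- ===== SOURCE A (Python) =====
-- def check_w(obj, x,y):
--     lx = x // 3
--     ly = y // 3
--     kx = x % 3
--     ky = y % 3
--     for m0 in range(0,3):
--         for m1 in range(0,3):
--             if kx == m0 and ky == m1:
--                 continue
--             if obj[y][x] == obj[3*ly + m1][3*lx + m0]:
--                 return False
--
--     return True
-- ===== SOURCE B (Python) =====
-- def check_w(obj, x, y):
--     v = obj[y][x]
--     box = sorted(obj[y - y % 3 + k // 3][x - x % 3 + k % 3] for k in range(9))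
--     i = box.index(v)
--     return i == 8 or box[i + 1] != v
-- ===== Notes on version B (the rewrite author's own statement) =====
-- stated objective: alternative
-- what changed: B replaces A's nested skip-the-self-cell duplicate scan with early return by a sort-then-adjacent-neighbour check: it sorts the nine 3x3-box values and returns whether the value at the cell's first sorted position is not followed by an equal value (in a sorted list equal values are contiguous, so this holds exactly when the cell's value occurs once in its box).
-- outside the precondition, e.g. on check_w([[1, 1, 1]], 1, 0): A returns False, B raises IndexError
import Mathlib
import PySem

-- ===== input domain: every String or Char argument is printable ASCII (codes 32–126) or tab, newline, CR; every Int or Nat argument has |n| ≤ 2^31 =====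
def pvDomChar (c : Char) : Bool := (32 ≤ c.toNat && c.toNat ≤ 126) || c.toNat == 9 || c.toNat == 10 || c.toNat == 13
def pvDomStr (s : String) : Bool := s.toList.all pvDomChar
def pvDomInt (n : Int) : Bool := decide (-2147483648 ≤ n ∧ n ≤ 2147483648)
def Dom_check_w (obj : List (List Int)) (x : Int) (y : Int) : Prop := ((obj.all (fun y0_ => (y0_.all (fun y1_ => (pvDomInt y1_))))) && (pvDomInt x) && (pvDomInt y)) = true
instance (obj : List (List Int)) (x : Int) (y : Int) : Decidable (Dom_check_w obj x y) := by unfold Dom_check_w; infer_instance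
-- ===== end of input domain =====

-- B replaces A's coordinate-skip/early-return scan of the 3x3 box by a sort-then-adjacent
-- check: sort the nine box values and test that the cell's value has no equal neighbour
-- after its first sorted position (objective: alternative algorithm, same cost).

-- obj[r][c]; the default 0 is never reached on inputs admitted by Pre_check_w.
def pvCell (obj : List (List Int)) (r c : Int) : Int :=
  PySem.List.pyGetD (PySem.List.pyGetD obj r []) c 0

-- ===== PORT A =====
def check_w (obj : List (List Int)) (x : Int) (y : Int) : Bool :=
  let lx := PySem.Int.floordiv x 3
  let ly := PySem.Int.floordiv y 3
  let kx := PySem.Int.mod x 3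
  let ky := PySem.Int.mod y 3
  (PySem.List.pyRange 0 3 1).all (fun m0 =>
    (PySem.List.pyRange 0 3 1).all (fun m1 =>
      if kx == m0 && ky == m1 then true
      else !(pvCell obj y x == pvCell obj (3*ly + m1) (3*lx + m0))))

-- ===== PORT B =====
def check_w_alt (obj : List (List Int)) (x : Int) (y : Int) : Bool :=
  let v := pvCell obj y x
  let box := PySem.List.sorted
    ((PySem.List.pyRange 0 9 1).map (fun k =>
      pvCell obj (y - PySem.Int.mod y 3 + PySem.Int.floordiv k 3)
                 (x - PySem.Int.mod x 3 + PySem.Int.mod k 3)))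
    (fun a => a) false
  match PySem.List.index? box v with
  | some i => (i == 8) || !(PySem.List.pyGetD box ((i : Int) + 1) 0 == v)
  | none => false  -- Python's ValueError branch; unreachable, v is the box's own cell

-- ===== PRECONDITION & SPEC =====
-- Pre_ requires the queried cell and every cell of its 3x3 box to be valid indices.
-- It excludes the inputs where A raises IndexError, and also inputs where A returns
-- False early, from a duplicate found before it touches a missing row/column of the
-- box (B naturally raises IndexError there, since it reads the whole box).
def Pre_check_w (obj : List (List Int)) (x : Int) (y : Int) : Prop :=
  PySem.Raise.InRange obj.length y ∧
  PySem.Raise.InRange (PySem.List.pyGetD obj y []).length x ∧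
  ∀ i ∈ PySem.List.pyRange 0 3 1,
    PySem.Raise.InRange obj.length (3 * PySem.Int.floordiv y 3 + i) ∧
    ∀ j ∈ PySem.List.pyRange 0 3 1,
      PySem.Raise.InRange (PySem.List.pyGetD obj (3 * PySem.Int.floordiv y 3 + i) []).length
        (3 * PySem.Int.floordiv x 3 + j)
instance (obj : List (List Int)) (x : Int) (y : Int) : Decidable (Pre_check_w obj x y) := by
  unfold Pre_check_w; infer_instance

def pvWitness_check_w : List (List Int) × Int × Int :=
  ([[1,2,3],[4,5,6],[7,8,9]], 1, 2)

def Spec_check_w (obj : List (List Int)) (x : Int) (y : Int) (out : Bool) : Prop := out = check_w_alt obj x y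
instance (obj : List (List Int)) (x : Int) (y : Int) (out : Bool) : Decidable (Spec_check_w obj x y out) := by unfold Spec_check_w; infer_instance

-- ===== CLAIM (what is proved, stated in full; the proofs are below) =====
def Claim_equal_check_w : Prop := ∀ (obj : List (List Int)) (x : Int) (y : Int), Dom_check_w obj x y → Pre_check_w obj x y → Spec_check_w obj x y (check_w obj x y)

-- ===== LEMMAS AND PROOFS =====

-- In a sorted list, equal values are contiguous, so v occurs exactly once iff the slot
-- after its first occurrence is past the end or holds a different value.
lemma pvSortedUnique (v : Int) : ∀ (s : List Int), s.Pairwise (· ≤ ·) →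
    ∀ i, PySem.List.index? s v = some i →
    (((i == s.length - 1) : Bool) || !(PySem.List.pyGetD s ((i : Int) + 1) 0 == v))
      = (List.count v s == 1) := by
  intro s
  induction s with
  | nil => intro _ i hi; rw [PySem.List.index?_eq_idxOf?] at hi; simp at hi
  | cons a t ih =>
    intro hp i hi
    rcases List.pairwise_cons.mp hp with ⟨ha, ht⟩
    by_cases hav : a = v
    · subst hav
      rw [PySem.List.index?_cons_self] at hi
      injection hi with hi0; subst hi0
      cases t with
      | nil => simp
      | cons b t' =>
        have hget : PySem.List.pyGetD (a :: b :: t') (((0:Nat) : Int) + 1) 0 = b := by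
          simp [pysem]
        rw [hget]
        rcases List.pairwise_cons.mp ht with ⟨hb, _⟩
        by_cases hba : b = a
        · subst hba
          simp [List.count_cons]
        · have hnot : a ∉ b :: t' := by
            intro hmem
            rcases List.mem_cons.mp hmem with h | h
            · exact hba h.symm
            · exact hba (le_antisymm (hb a h) (ha b (List.mem_cons_self)))
          have hc : List.count a (b :: t') = 0 := List.count_eq_zero.mpr hnot
          rw [Bool.eq_iff_iff]
          simp only [List.count_cons_self, hc, Bool.or_eq_true, beq_iff_eq, List.length_cons,
            Bool.not_eq_true', beq_eq_false_iff_ne, ne_eq]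
          exact iff_of_true (Or.inr (fun h => hba h)) trivial
    · rw [PySem.List.index?_cons_of_ne t hav] at hi
      rcases Option.map_eq_some_iff.mp hi with ⟨j, hj, hij⟩
      subst hij
      have hjlt : j < t.length := by
        rcases PySem.List.getElem_of_index?_eq_some hj with ⟨hk, _, _⟩; exact hk
      have hrec := ih ht j hj
      have hcast : ((j + 1 : Nat) : Int) + 1 = (((j + 2 : Nat) : Nat) : Int) := by push_cast; ring
      have hget : PySem.List.pyGetD (a :: t) (((j + 1 : Nat) : Int) + 1) 0
          = PySem.List.pyGetD t ((j : Int) + 1) 0 := by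
        rw [hcast, PySem.List.pyGetD_natCast]
        rw [show ((j : Int) + 1) = ((j + 1 : Nat) : Int) by push_cast; ring, PySem.List.pyGetD_natCast]
        simp [List.getD]
      rw [hget]
      have hbeq : ((j + 1 == (a :: t).length - 1) : Bool) = ((j == t.length - 1) : Bool) := by
        rw [Bool.eq_iff_iff]; simp only [beq_iff_eq, List.length_cons]; omega
      rw [hbeq, hrec]
      rw [Bool.eq_iff_iff]
      simp only [beq_iff_eq, List.count_cons, if_neg hav]
      omega

lemma pvCountOneB (v : Int) (l1 l2 : List Int) :
    (List.count v (l1 ++ v :: l2) == 1) = (l1.all (fun a => !(v == a)) && l2.all (fun a => !(v == a))) := by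
  rw [Bool.eq_iff_iff]
  simp only [beq_iff_eq, List.count_append, List.count_cons_self, List.all_eq_true,
    Bool.and_eq_true, Bool.not_eq_true', beq_eq_false_iff_ne, ne_eq]
  have h : List.count v l1 + (List.count v l2 + 1) = 1 ↔ List.count v l1 = 0 ∧ List.count v l2 = 0 := by
    omega
  rw [h]
  simp [List.count_eq_zero]
  aesop

lemma pvC0 (v r0c1 r0c2 r1c0 r1c1 r1c2 r2c0 r2c1 r2c2 : Int) :
    (List.count v [v, r0c1, r0c2, r1c0, r1c1, r1c2, r2c0, r2c1, r2c2] == 1) = (!(v == r0c1) && !(v == r0c2) && !(v == r1c0) && !(v == r1c1) && !(v == r1c2) && !(v == r2c0) && !(v == r2c1) && !(v == r2c2)) := by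
  rw [show ([v, r0c1, r0c2, r1c0, r1c1, r1c2, r2c0, r2c1, r2c2] : List Int) = [] ++ v :: [r0c1, r0c2, r1c0, r1c1, r1c2, r2c0, r2c1, r2c2] from rfl,
    pvCountOneB]
  rw [Bool.eq_iff_iff]; simp; tauto

lemma pvC1 (v r0c0 r0c2 r1c0 r1c1 r1c2 r2c0 r2c1 r2c2 : Int) :
    (List.count v [r0c0, v, r0c2, r1c0, r1c1, r1c2, r2c0, r2c1, r2c2] == 1) = (!(v == r0c0) && !(v == r0c2) && !(v == r1c0) && !(v == r1c1) && !(v == r1c2) && !(v == r2c0) && !(v == r2c1) && !(v == r2c2)) := by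
  rw [show ([r0c0, v, r0c2, r1c0, r1c1, r1c2, r2c0, r2c1, r2c2] : List Int) = [r0c0] ++ v :: [r0c2, r1c0, r1c1, r1c2, r2c0, r2c1, r2c2] from rfl,
    pvCountOneB]
  rw [Bool.eq_iff_iff]; simp; tauto

lemma pvC2 (v r0c0 r0c1 r1c0 r1c1 r1c2 r2c0 r2c1 r2c2 : Int) :
    (List.count v [r0c0, r0c1, v, r1c0, r1c1, r1c2, r2c0, r2c1, r2c2] == 1) = (!(v == r0c0) && !(v == r0c1) && !(v == r1c0) && !(v == r1c1) && !(v == r1c2) && !(v == r2c0) && !(v == r2c1) && !(v == r2c2)) := by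
  rw [show ([r0c0, r0c1, v, r1c0, r1c1, r1c2, r2c0, r2c1, r2c2] : List Int) = [r0c0, r0c1] ++ v :: [r1c0, r1c1, r1c2, r2c0, r2c1, r2c2] from rfl,
    pvCountOneB]
  rw [Bool.eq_iff_iff]; simp; tauto

lemma pvC3 (v r0c0 r0c1 r0c2 r1c1 r1c2 r2c0 r2c1 r2c2 : Int) :
    (List.count v [r0c0, r0c1, r0c2, v, r1c1, r1c2, r2c0, r2c1, r2c2] == 1) = (!(v == r0c0) && !(v == r0c1) && !(v == r0c2) && !(v == r1c1) && !(v == r1c2) && !(v == r2c0) && !(v == r2c1) && !(v == r2c2)) := by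
  rw [show ([r0c0, r0c1, r0c2, v, r1c1, r1c2, r2c0, r2c1, r2c2] : List Int) = [r0c0, r0c1, r0c2] ++ v :: [r1c1, r1c2, r2c0, r2c1, r2c2] from rfl,
    pvCountOneB]
  rw [Bool.eq_iff_iff]; simp; tauto

lemma pvC4 (v r0c0 r0c1 r0c2 r1c0 r1c2 r2c0 r2c1 r2c2 : Int) :
    (List.count v [r0c0, r0c1, r0c2, r1c0, v, r1c2, r2c0, r2c1, r2c2] == 1) = (!(v == r0c0) && !(v == r0c1) && !(v == r0c2) && !(v == r1c0) && !(v == r1c2) && !(v == r2c0) && !(v == r2c1) && !(v == r2c2)) := by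
  rw [show ([r0c0, r0c1, r0c2, r1c0, v, r1c2, r2c0, r2c1, r2c2] : List Int) = [r0c0, r0c1, r0c2, r1c0] ++ v :: [r1c2, r2c0, r2c1, r2c2] from rfl,
    pvCountOneB]
  rw [Bool.eq_iff_iff]; simp; tauto

lemma pvC5 (v r0c0 r0c1 r0c2 r1c0 r1c1 r2c0 r2c1 r2c2 : Int) :
    (List.count v [r0c0, r0c1, r0c2, r1c0, r1c1, v, r2c0, r2c1, r2c2] == 1) = (!(v == r0c0) && !(v == r0c1) && !(v == r0c2) && !(v == r1c0) && !(v == r1c1) && !(v == r2c0) && !(v == r2c1) && !(v == r2c2)) := by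
  rw [show ([r0c0, r0c1, r0c2, r1c0, r1c1, v, r2c0, r2c1, r2c2] : List Int) = [r0c0, r0c1, r0c2, r1c0, r1c1] ++ v :: [r2c0, r2c1, r2c2] from rfl,
    pvCountOneB]
  rw [Bool.eq_iff_iff]; simp; tauto

lemma pvC6 (v r0c0 r0c1 r0c2 r1c0 r1c1 r1c2 r2c1 r2c2 : Int) :
    (List.count v [r0c0, r0c1, r0c2, r1c0, r1c1, r1c2, v, r2c1, r2c2] == 1) = (!(v == r0c0) && !(v == r0c1) && !(v == r0c2) && !(v == r1c0) && !(v == r1c1) && !(v == r1c2) && !(v == r2c1) && !(v == r2c2)) := by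
  rw [show ([r0c0, r0c1, r0c2, r1c0, r1c1, r1c2, v, r2c1, r2c2] : List Int) = [r0c0, r0c1, r0c2, r1c0, r1c1, r1c2] ++ v :: [r2c1, r2c2] from rfl,
    pvCountOneB]
  rw [Bool.eq_iff_iff]; simp; tauto

lemma pvC7 (v r0c0 r0c1 r0c2 r1c0 r1c1 r1c2 r2c0 r2c2 : Int) :
    (List.count v [r0c0, r0c1, r0c2, r1c0, r1c1, r1c2, r2c0, v, r2c2] == 1) = (!(v == r0c0) && !(v == r0c1) && !(v == r0c2) && !(v == r1c0) && !(v == r1c1) && !(v == r1c2) && !(v == r2c0) && !(v == r2c2)) := by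
  rw [show ([r0c0, r0c1, r0c2, r1c0, r1c1, r1c2, r2c0, v, r2c2] : List Int) = [r0c0, r0c1, r0c2, r1c0, r1c1, r1c2, r2c0] ++ v :: [r2c2] from rfl,
    pvCountOneB]
  rw [Bool.eq_iff_iff]; simp; tauto

lemma pvC8 (v r0c0 r0c1 r0c2 r1c0 r1c1 r1c2 r2c0 r2c1 : Int) :
    (List.count v [r0c0, r0c1, r0c2, r1c0, r1c1, r1c2, r2c0, r2c1, v] == 1) = (!(v == r0c0) && !(v == r0c1) && !(v == r0c2) && !(v == r1c0) && !(v == r1c1) && !(v == r1c2) && !(v == r2c0) && !(v == r2c1)) := by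
  rw [show ([r0c0, r0c1, r0c2, r1c0, r1c1, r1c2, r2c0, r2c1, v] : List Int) = [r0c0, r0c1, r0c2, r1c0, r1c1, r1c2, r2c0, r2c1] ++ v :: [] from rfl,
    pvCountOneB]
  rw [Bool.eq_iff_iff]; simp; tauto

set_option maxHeartbeats 1000000 in
-- A's skip-and-scan of the box equals "v occurs exactly once among the nine box cells".
lemma pvA_count (obj : List (List Int)) (x y : Int) :
    check_w obj x y = (List.count (pvCell obj y x)
      [pvCell obj (3 * PySem.Int.floordiv y 3 + 0) (3 * PySem.Int.floordiv x 3 + 0),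
       pvCell obj (3 * PySem.Int.floordiv y 3 + 0) (3 * PySem.Int.floordiv x 3 + 1),
       pvCell obj (3 * PySem.Int.floordiv y 3 + 0) (3 * PySem.Int.floordiv x 3 + 2),
       pvCell obj (3 * PySem.Int.floordiv y 3 + 1) (3 * PySem.Int.floordiv x 3 + 0),
       pvCell obj (3 * PySem.Int.floordiv y 3 + 1) (3 * PySem.Int.floordiv x 3 + 1),
       pvCell obj (3 * PySem.Int.floordiv y 3 + 1) (3 * PySem.Int.floordiv x 3 + 2),
       pvCell obj (3 * PySem.Int.floordiv y 3 + 2) (3 * PySem.Int.floordiv x 3 + 0),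
       pvCell obj (3 * PySem.Int.floordiv y 3 + 2) (3 * PySem.Int.floordiv x 3 + 1),
       pvCell obj (3 * PySem.Int.floordiv y 3 + 2) (3 * PySem.Int.floordiv x 3 + 2)] == 1) := by
  have h3 : PySem.List.pyRange (0:Int) 3 1 = [0, 1, 2] := by decide
  have hfm := PySem.Int.floordiv_mul_add_mod x 3
  have hfm' := PySem.Int.floordiv_mul_add_mod y 3
  have hv : pvCell obj y x =
      pvCell obj (3 * PySem.Int.floordiv y 3 + PySem.Int.mod y 3)
        (3 * PySem.Int.floordiv x 3 + PySem.Int.mod x 3) := by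
    rw [show 3 * PySem.Int.floordiv y 3 + PySem.Int.mod y 3 = y from by omega,
      show 3 * PySem.Int.floordiv x 3 + PySem.Int.mod x 3 = x from by omega]
  have hxb : 0 ≤ PySem.Int.mod x 3 ∧ PySem.Int.mod x 3 < 3 :=
    ⟨PySem.Int.mod_nonneg x (by norm_num), PySem.Int.mod_lt x (by norm_num)⟩
  have hyb : 0 ≤ PySem.Int.mod y 3 ∧ PySem.Int.mod y 3 < 3 :=
    ⟨PySem.Int.mod_nonneg y (by norm_num), PySem.Int.mod_lt y (by norm_num)⟩
  have hex : PySem.Int.mod x 3 = 0 ∨ PySem.Int.mod x 3 = 1 ∨ PySem.Int.mod x 3 = 2 := by omega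
  have hey : PySem.Int.mod y 3 = 0 ∨ PySem.Int.mod y 3 = 1 ∨ PySem.Int.mod y 3 = 2 := by omega
  rcases hex with h1 | h1 | h1 <;> rcases hey with h2 | h2 | h2
  · -- kx = 0, ky = 0
    rw [hv, h1, h2, pvC0]
    have h1' : x % 3 = 0 := by
      rw [← PySem.Int.mod_eq_emod_of_pos (by norm_num : (0:Int) < 3)]; exact h1
    have h2' : y % 3 = 0 := by
      rw [← PySem.Int.mod_eq_emod_of_pos (by norm_num : (0:Int) < 3)]; exact h2
    have hdx : (3:Int) ∣ x := by omega
    have hdy : (3:Int) ∣ y := by omega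
    simp [check_w, h3, hv, h1, h2, h1', h2', hdx, hdy]
    rw [Bool.eq_iff_iff]
    simp only [Bool.and_eq_true, Bool.not_eq_true', beq_eq_false_iff_ne, ne_eq]
    tauto
  · -- kx = 0, ky = 1
    rw [hv, h1, h2, pvC3]
    have h1' : x % 3 = 0 := by
      rw [← PySem.Int.mod_eq_emod_of_pos (by norm_num : (0:Int) < 3)]; exact h1
    have h2' : y % 3 = 1 := by
      rw [← PySem.Int.mod_eq_emod_of_pos (by norm_num : (0:Int) < 3)]; exact h2
    have hdx : (3:Int) ∣ x := by omega
    have hdy : ¬ (3:Int) ∣ y := by omega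
    simp [check_w, h3, hv, h1, h2, h1', h2', hdx, hdy]
    rw [Bool.eq_iff_iff]
    simp only [Bool.and_eq_true, Bool.not_eq_true', beq_eq_false_iff_ne, ne_eq]
    tauto
  · -- kx = 0, ky = 2
    rw [hv, h1, h2, pvC6]
    have h1' : x % 3 = 0 := by
      rw [← PySem.Int.mod_eq_emod_of_pos (by norm_num : (0:Int) < 3)]; exact h1
    have h2' : y % 3 = 2 := by
      rw [← PySem.Int.mod_eq_emod_of_pos (by norm_num : (0:Int) < 3)]; exact h2
    have hdx : (3:Int) ∣ x := by omega
    have hdy : ¬ (3:Int) ∣ y := by omega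
    simp [check_w, h3, hv, h1, h2, h1', h2', hdx, hdy]
    rw [Bool.eq_iff_iff]
    simp only [Bool.and_eq_true, Bool.not_eq_true', beq_eq_false_iff_ne, ne_eq]
    tauto
  · -- kx = 1, ky = 0
    rw [hv, h1, h2, pvC1]
    have h1' : x % 3 = 1 := by
      rw [← PySem.Int.mod_eq_emod_of_pos (by norm_num : (0:Int) < 3)]; exact h1
    have h2' : y % 3 = 0 := by
      rw [← PySem.Int.mod_eq_emod_of_pos (by norm_num : (0:Int) < 3)]; exact h2
    have hdx : ¬ (3:Int) ∣ x := by omega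
    have hdy : (3:Int) ∣ y := by omega
    simp [check_w, h3, hv, h1, h2, h1', h2', hdx, hdy]
    rw [Bool.eq_iff_iff]
    simp only [Bool.and_eq_true, Bool.not_eq_true', beq_eq_false_iff_ne, ne_eq]
    tauto
  · -- kx = 1, ky = 1
    rw [hv, h1, h2, pvC4]
    have h1' : x % 3 = 1 := by
      rw [← PySem.Int.mod_eq_emod_of_pos (by norm_num : (0:Int) < 3)]; exact h1
    have h2' : y % 3 = 1 := by
      rw [← PySem.Int.mod_eq_emod_of_pos (by norm_num : (0:Int) < 3)]; exact h2
    have hdx : ¬ (3:Int) ∣ x := by omega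
    have hdy : ¬ (3:Int) ∣ y := by omega
    simp [check_w, h3, hv, h1, h2, h1', h2', hdx, hdy]
    rw [Bool.eq_iff_iff]
    simp only [Bool.and_eq_true, Bool.not_eq_true', beq_eq_false_iff_ne, ne_eq]
    tauto
  · -- kx = 1, ky = 2
    rw [hv, h1, h2, pvC7]
    have h1' : x % 3 = 1 := by
      rw [← PySem.Int.mod_eq_emod_of_pos (by norm_num : (0:Int) < 3)]; exact h1
    have h2' : y % 3 = 2 := by
      rw [← PySem.Int.mod_eq_emod_of_pos (by norm_num : (0:Int) < 3)]; exact h2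
    have hdx : ¬ (3:Int) ∣ x := by omega
    have hdy : ¬ (3:Int) ∣ y := by omega
    simp [check_w, h3, hv, h1, h2, h1', h2', hdx, hdy]
    rw [Bool.eq_iff_iff]
    simp only [Bool.and_eq_true, Bool.not_eq_true', beq_eq_false_iff_ne, ne_eq]
    tauto
  · -- kx = 2, ky = 0
    rw [hv, h1, h2, pvC2]
    have h1' : x % 3 = 2 := by
      rw [← PySem.Int.mod_eq_emod_of_pos (by norm_num : (0:Int) < 3)]; exact h1
    have h2' : y % 3 = 0 := by
      rw [← PySem.Int.mod_eq_emod_of_pos (by norm_num : (0:Int) < 3)]; exact h2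
    have hdx : ¬ (3:Int) ∣ x := by omega
    have hdy : (3:Int) ∣ y := by omega
    simp [check_w, h3, hv, h1, h2, h1', h2', hdx, hdy]
    rw [Bool.eq_iff_iff]
    simp only [Bool.and_eq_true, Bool.not_eq_true', beq_eq_false_iff_ne, ne_eq]
    tauto
  · -- kx = 2, ky = 1
    rw [hv, h1, h2, pvC5]
    have h1' : x % 3 = 2 := by
      rw [← PySem.Int.mod_eq_emod_of_pos (by norm_num : (0:Int) < 3)]; exact h1
    have h2' : y % 3 = 1 := by
      rw [← PySem.Int.mod_eq_emod_of_pos (by norm_num : (0:Int) < 3)]; exact h2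
    have hdx : ¬ (3:Int) ∣ x := by omega
    have hdy : ¬ (3:Int) ∣ y := by omega
    simp [check_w, h3, hv, h1, h2, h1', h2', hdx, hdy]
    rw [Bool.eq_iff_iff]
    simp only [Bool.and_eq_true, Bool.not_eq_true', beq_eq_false_iff_ne, ne_eq]
    tauto
  · -- kx = 2, ky = 2
    rw [hv, h1, h2, pvC8]
    have h1' : x % 3 = 2 := by
      rw [← PySem.Int.mod_eq_emod_of_pos (by norm_num : (0:Int) < 3)]; exact h1
    have h2' : y % 3 = 2 := by
      rw [← PySem.Int.mod_eq_emod_of_pos (by norm_num : (0:Int) < 3)]; exact h2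
    have hdx : ¬ (3:Int) ∣ x := by omega
    have hdy : ¬ (3:Int) ∣ y := by omega
    simp [check_w, h3, hv, h1, h2, h1', h2', hdx, hdy]
    rw [Bool.eq_iff_iff]
    simp only [Bool.and_eq_true, Bool.not_eq_true', beq_eq_false_iff_ne, ne_eq]
    tauto

-- B's sort-then-adjacent-check equals the same count-one test on the same nine cells.
lemma pvB_count (obj : List (List Int)) (x y : Int)
    (hv : pvCell obj y x ∈
      [pvCell obj (y - PySem.Int.mod y 3 + 0) (x - PySem.Int.mod x 3 + 0),
       pvCell obj (y - PySem.Int.mod y 3 + 0) (x - PySem.Int.mod x 3 + 1),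
       pvCell obj (y - PySem.Int.mod y 3 + 0) (x - PySem.Int.mod x 3 + 2),
       pvCell obj (y - PySem.Int.mod y 3 + 1) (x - PySem.Int.mod x 3 + 0),
       pvCell obj (y - PySem.Int.mod y 3 + 1) (x - PySem.Int.mod x 3 + 1),
       pvCell obj (y - PySem.Int.mod y 3 + 1) (x - PySem.Int.mod x 3 + 2),
       pvCell obj (y - PySem.Int.mod y 3 + 2) (x - PySem.Int.mod x 3 + 0),
       pvCell obj (y - PySem.Int.mod y 3 + 2) (x - PySem.Int.mod x 3 + 1),
       pvCell obj (y - PySem.Int.mod y 3 + 2) (x - PySem.Int.mod x 3 + 2)]) :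
    check_w_alt obj x y = (List.count (pvCell obj y x)
      [pvCell obj (y - PySem.Int.mod y 3 + 0) (x - PySem.Int.mod x 3 + 0),
       pvCell obj (y - PySem.Int.mod y 3 + 0) (x - PySem.Int.mod x 3 + 1),
       pvCell obj (y - PySem.Int.mod y 3 + 0) (x - PySem.Int.mod x 3 + 2),
       pvCell obj (y - PySem.Int.mod y 3 + 1) (x - PySem.Int.mod x 3 + 0),
       pvCell obj (y - PySem.Int.mod y 3 + 1) (x - PySem.Int.mod x 3 + 1),
       pvCell obj (y - PySem.Int.mod y 3 + 1) (x - PySem.Int.mod x 3 + 2),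
       pvCell obj (y - PySem.Int.mod y 3 + 2) (x - PySem.Int.mod x 3 + 0),
       pvCell obj (y - PySem.Int.mod y 3 + 2) (x - PySem.Int.mod x 3 + 1),
       pvCell obj (y - PySem.Int.mod y 3 + 2) (x - PySem.Int.mod x 3 + 2)] == 1) := by
  have hr9 : PySem.List.pyRange (0 : Int) 9 1 = [0, 1, 2, 3, 4, 5, 6, 7, 8] := by decide
  have hbox : ((PySem.List.pyRange (0:Int) 9 1).map (fun k =>
      pvCell obj (y - PySem.Int.mod y 3 + PySem.Int.floordiv k 3)
                 (x - PySem.Int.mod x 3 + PySem.Int.mod k 3)))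
      = [pvCell obj (y - PySem.Int.mod y 3 + 0) (x - PySem.Int.mod x 3 + 0),
         pvCell obj (y - PySem.Int.mod y 3 + 0) (x - PySem.Int.mod x 3 + 1),
         pvCell obj (y - PySem.Int.mod y 3 + 0) (x - PySem.Int.mod x 3 + 2),
         pvCell obj (y - PySem.Int.mod y 3 + 1) (x - PySem.Int.mod x 3 + 0),
         pvCell obj (y - PySem.Int.mod y 3 + 1) (x - PySem.Int.mod x 3 + 1),
         pvCell obj (y - PySem.Int.mod y 3 + 1) (x - PySem.Int.mod x 3 + 2),
         pvCell obj (y - PySem.Int.mod y 3 + 2) (x - PySem.Int.mod x 3 + 0),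
         pvCell obj (y - PySem.Int.mod y 3 + 2) (x - PySem.Int.mod x 3 + 1),
         pvCell obj (y - PySem.Int.mod y 3 + 2) (x - PySem.Int.mod x 3 + 2)] := by
    rw [hr9]
    norm_num [PySem.Int.floordiv_eq_ediv_of_pos, PySem.Int.mod_eq_emod_of_pos]
  unfold check_w_alt
  rw [hbox]
  set L := [pvCell obj (y - PySem.Int.mod y 3 + 0) (x - PySem.Int.mod x 3 + 0),
       pvCell obj (y - PySem.Int.mod y 3 + 0) (x - PySem.Int.mod x 3 + 1),
       pvCell obj (y - PySem.Int.mod y 3 + 0) (x - PySem.Int.mod x 3 + 2),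
       pvCell obj (y - PySem.Int.mod y 3 + 1) (x - PySem.Int.mod x 3 + 0),
       pvCell obj (y - PySem.Int.mod y 3 + 1) (x - PySem.Int.mod x 3 + 1),
       pvCell obj (y - PySem.Int.mod y 3 + 1) (x - PySem.Int.mod x 3 + 2),
       pvCell obj (y - PySem.Int.mod y 3 + 2) (x - PySem.Int.mod x 3 + 0),
       pvCell obj (y - PySem.Int.mod y 3 + 2) (x - PySem.Int.mod x 3 + 1),
       pvCell obj (y - PySem.Int.mod y 3 + 2) (x - PySem.Int.mod x 3 + 2)] with hL
  set v := pvCell obj y x with hvdef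
  set s := PySem.List.sorted L (fun a => a) false with hs
  have hmem : v ∈ s := (PySem.List.mem_sorted L _ false v).mpr hv
  have hsome : (PySem.List.index? s v).isSome :=
    (PySem.List.index?_isSome_iff s v).mpr hmem
  obtain ⟨i, hi⟩ := Option.isSome_iff_exists.mp hsome
  show (match PySem.List.index? s v with
    | some i => (i == 8) || !(PySem.List.pyGetD s ((i : Int) + 1) 0 == v)
    | none => false) = (List.count v L == 1)
  rw [hi]
  have hlen : s.length = 9 := by rw [hs, PySem.List.length_sorted, hL]; rfl
  have hpw : s.Pairwise (· ≤ ·) := by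
    have := PySem.List.sorted_pairwise L (fun a => a)
    simpa [hs] using this
  have hkey := pvSortedUnique v s hpw i hi
  rw [hlen] at hkey
  have hcnt : List.count v s = List.count v L :=
    (PySem.List.sorted_perm L (fun a => a) false).count_eq v
  rw [hcnt] at hkey
  exact hkey

lemma pvMain (obj : List (List Int)) (x y : Int) : check_w obj x y = check_w_alt obj x y := by
  have hfm := PySem.Int.floordiv_mul_add_mod x 3
  have hfm' := PySem.Int.floordiv_mul_add_mod y 3
  have hx3 : 3 * PySem.Int.floordiv x 3 = x - PySem.Int.mod x 3 := by omega
  have hy3 : 3 * PySem.Int.floordiv y 3 = y - PySem.Int.mod y 3 := by omega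
  have hA := pvA_count obj x y
  rw [hx3, hy3] at hA
  have hxb : 0 ≤ PySem.Int.mod x 3 ∧ PySem.Int.mod x 3 < 3 :=
    ⟨PySem.Int.mod_nonneg x (by norm_num), PySem.Int.mod_lt x (by norm_num)⟩
  have hyb : 0 ≤ PySem.Int.mod y 3 ∧ PySem.Int.mod y 3 < 3 :=
    ⟨PySem.Int.mod_nonneg y (by norm_num), PySem.Int.mod_lt y (by norm_num)⟩
  have hex : PySem.Int.mod x 3 = 0 ∨ PySem.Int.mod x 3 = 1 ∨ PySem.Int.mod x 3 = 2 := by omega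
  have hey : PySem.Int.mod y 3 = 0 ∨ PySem.Int.mod y 3 = 1 ∨ PySem.Int.mod y 3 = 2 := by omega
  have hmx : PySem.Int.mod x 3 = x % 3 := PySem.Int.mod_eq_emod_of_pos (by norm_num)
  have hmy : PySem.Int.mod y 3 = y % 3 := PySem.Int.mod_eq_emod_of_pos (by norm_num)
  have hv : pvCell obj y x ∈
      [pvCell obj (y - PySem.Int.mod y 3 + 0) (x - PySem.Int.mod x 3 + 0),
       pvCell obj (y - PySem.Int.mod y 3 + 0) (x - PySem.Int.mod x 3 + 1),
       pvCell obj (y - PySem.Int.mod y 3 + 0) (x - PySem.Int.mod x 3 + 2),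
       pvCell obj (y - PySem.Int.mod y 3 + 1) (x - PySem.Int.mod x 3 + 0),
       pvCell obj (y - PySem.Int.mod y 3 + 1) (x - PySem.Int.mod x 3 + 1),
       pvCell obj (y - PySem.Int.mod y 3 + 1) (x - PySem.Int.mod x 3 + 2),
       pvCell obj (y - PySem.Int.mod y 3 + 2) (x - PySem.Int.mod x 3 + 0),
       pvCell obj (y - PySem.Int.mod y 3 + 2) (x - PySem.Int.mod x 3 + 1),
       pvCell obj (y - PySem.Int.mod y 3 + 2) (x - PySem.Int.mod x 3 + 2)] := by
    rcases hex with h1 | h1 | h1 <;> rcases hey with h2 | h2 | h2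
    · have e1 : x - x % 3 + 0 = x := by omega
      have e2 : y - y % 3 + 0 = y := by omega
      simp [e1, e2]
    · have e1 : x - x % 3 + 0 = x := by omega
      have e2 : y - y % 3 + 1 = y := by omega
      simp [e1, e2]
    · have e1 : x - x % 3 + 0 = x := by omega
      have e2 : y - y % 3 + 2 = y := by omega
      simp [e1, e2]
    · have e1 : x - x % 3 + 1 = x := by omega
      have e2 : y - y % 3 + 0 = y := by omega
      simp [e1, e2]
    · have e1 : x - x % 3 + 1 = x := by omega
      have e2 : y - y % 3 + 1 = y := by omega
      simp [e1, e2]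
    · have e1 : x - x % 3 + 1 = x := by omega
      have e2 : y - y % 3 + 2 = y := by omega
      simp [e1, e2]
    · have e1 : x - x % 3 + 2 = x := by omega
      have e2 : y - y % 3 + 0 = y := by omega
      simp [e1, e2]
    · have e1 : x - x % 3 + 2 = x := by omega
      have e2 : y - y % 3 + 1 = y := by omega
      simp [e1, e2]
    · have e1 : x - x % 3 + 2 = x := by omega
      have e2 : y - y % 3 + 2 = y := by omega
      simp [e1, e2]
  rw [hA, pvB_count obj x y hv]

-- ===== VERDICT (by name: the statement is the Claim_ definition above) =====
theorem check_w_spec : Claim_equal_check_w := by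
  intro obj x y _ _
  unfold Spec_check_w
  exact pvMain obj x y
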